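-- pv_equiv track=rewrite | github.com/avdolgikh/algorithms | coursera/Tasks_execution/AlgorithmToolbox/w5_primitive_calculator.py | optimal_sequence3
-- ===== SOURCE A (Python) =====
-- def optimal_sequence3(n):
--     n_operations = [None, 0]
--     sequences = { 1: [1]}
--
--     for j in range(2, n+1):
--         n_ops = n_operations[j - 1] + 1
--         sequences[j] = sequences[j - 1] + [j]
--
--         if j % 3 == 0 and n_operations[j // 3] + 1 < n_ops:
--             n_ops = n_operations[j // 3] + 1
--             sequences[j] = sequences[j // 3] + [j]
--
--         if j % 2 == 0 and n_operations[j // 2] + 1 < n_ops: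
--             n_ops = n_operations[j // 2] + 1
--             sequences[j] = sequences[j // 2] + [j]
--
--         n_operations.append(n_ops)
--
--     return n_operations[n], sequences[n]
-- ===== SOURCE B (Python) =====
-- def optimal_sequence3(n):
--     # O(n): store only cost and predecessor per value, backtrack once at the end
--     cost = [0, 0]
--     pred = [0, 0]
--     for j in range(2, n + 1):
--         best_c = cost[j - 1] + 1
--         best_p = j - 1
--         if j % 3 == 0 and cost[j // 3] + 1 < best_c:
--             best_c = cost[j // 3] + 1
--             best_p = j // 3
--         if j % 2 == 0 and cost[j // 2] + 1 < best_c: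
--             best_c = cost[j // 2] + 1
--             best_p = j // 2
--         cost.append(best_c)
--         pred.append(best_p)
--     seq = []
--     j = n
--     while j > 1:
--         seq.append(j)
--         j = pred[j]
--     seq.append(1)
--     seq.reverse()
--     return cost[n], seq
-- ===== Notes on version B (the rewrite author's own statement) =====
-- stated objective: faster
-- what changed: Instead of storing the full operation sequence for every value (quadratic list copying), B stores one predecessor pointer per value and reconstructs the sequence by a single backtracking pass at the end.
import Mathlib
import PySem

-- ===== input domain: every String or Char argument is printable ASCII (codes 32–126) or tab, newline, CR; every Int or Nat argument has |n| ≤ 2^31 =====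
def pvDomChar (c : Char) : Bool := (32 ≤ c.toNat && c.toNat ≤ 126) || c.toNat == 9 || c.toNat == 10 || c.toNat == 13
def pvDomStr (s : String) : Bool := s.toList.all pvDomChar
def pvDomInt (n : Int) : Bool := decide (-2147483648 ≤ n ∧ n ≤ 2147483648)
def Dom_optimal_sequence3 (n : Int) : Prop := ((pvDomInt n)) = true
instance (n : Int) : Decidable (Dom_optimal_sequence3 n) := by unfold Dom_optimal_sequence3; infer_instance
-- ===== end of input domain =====

-- B replaces A's per-value sequence lists (building and storing a path list for every value)
-- by one predecessor pointer per value plus a single backtracking pass at the end.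
-- Python lists are ported as Lean Arrays (index/append cost as in Python).

-- Python a[i] (the reads below are always in range on the admitted inputs; the default
-- stands where Python would raise IndexError/KeyError, which never happens here)
def pvIdx {α : Type} (a : Array α) (i : Int) (d : α) : α :=
  if h : 0 ≤ i ∧ i.toNat < a.size then a[i.toNat]'h.2 else d

-- A's 'sequences' dict holds exactly the dense integer keys 1..j, so it is ported as an
-- array indexed by the key (index 0 unused): dict assignment = overwrite-or-append (exact here)
def pvDSet (a : Array (List Int)) (i : Int) (v : List Int) : Array (List Int) :=
  if i.toNat < a.size then a.setIfInBounds i.toNat v else a.push v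

-- ===== PORT A =====
-- loop body of A's 'for j in range(2, n+1)'; state = (n_operations, sequences).
-- n_operations[0] is Python's None, hence Array (Option Int); the '.getD 0' default is
-- never taken on the indices this code reads (all ≥ 1)
def pvStepA (st : Array (Option Int) × Array (List Int)) (j : Int) :
    Array (Option Int) × Array (List Int) :=
  let nops1 : Int := (pvIdx st.1 (j - 1) none).getD 0 + 1
  let seqs1 := pvDSet st.2 j (pvIdx st.2 (j - 1) [] ++ [j])
  let st3 : Int × Array (List Int) :=
    if PySem.Int.mod j 3 == 0 &&
        decide ((pvIdx st.1 (PySem.Int.floordiv j 3) none).getD 0 + 1 < nops1) then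
      ((pvIdx st.1 (PySem.Int.floordiv j 3) none).getD 0 + 1,
       pvDSet seqs1 j (pvIdx seqs1 (PySem.Int.floordiv j 3) [] ++ [j]))
    else (nops1, seqs1)
  let st2 : Int × Array (List Int) :=
    if PySem.Int.mod j 2 == 0 &&
        decide ((pvIdx st.1 (PySem.Int.floordiv j 2) none).getD 0 + 1 < st3.1) then
      ((pvIdx st.1 (PySem.Int.floordiv j 2) none).getD 0 + 1,
       pvDSet st3.2 j (pvIdx st3.2 (PySem.Int.floordiv j 2) [] ++ [j]))
    else st3
  (st.1.push (some st2.1), st2.2)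

def optimal_sequence3 (n : Int) : Int × List Int :=
  let st := (PySem.List.pyRange 2 (n + 1) 1).foldl pvStepA
      (#[none, some 0], #[[], [1]])
  ((pvIdx st.1 n none).getD 0, pvIdx st.2 n [])

-- ===== PORT B =====
-- loop body of B's 'for j in range(2, n+1)'; state = (cost, pred)
def pvStepB (st : Array Int × Array Int) (j : Int) : Array Int × Array Int :=
  let bc1 : Int := pvIdx st.1 (j - 1) 0 + 1
  let bp1 : Int := j - 1
  let b3 : Int × Int :=
    if PySem.Int.mod j 3 == 0 &&
        decide (pvIdx st.1 (PySem.Int.floordiv j 3) 0 + 1 < bc1) then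
      (pvIdx st.1 (PySem.Int.floordiv j 3) 0 + 1, PySem.Int.floordiv j 3)
    else (bc1, bp1)
  let b2 : Int × Int :=
    if PySem.Int.mod j 2 == 0 &&
        decide (pvIdx st.1 (PySem.Int.floordiv j 2) 0 + 1 < b3.1) then
      (pvIdx st.1 (PySem.Int.floordiv j 2) 0 + 1, PySem.Int.floordiv j 2)
    else b3
  (st.1.push b2.1, st.2.push b2.2)

-- B's 'while j > 1: seq.append(j); j = pred[j]' loop; the fuel only makes the recursion
-- structural (j strictly decreases and stays ≥ 1, so n.toNat steps always suffice)
def pvBacktrack (pred : Array Int) : Nat → Int → List Int → List Int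
  | 0, _, acc => acc
  | fuel + 1, j, acc =>
      if 1 < j then pvBacktrack pred fuel (pvIdx pred j 0) (acc ++ [j]) else acc

def optimal_sequence3_alt (n : Int) : Int × List Int :=
  let st := (PySem.List.pyRange 2 (n + 1) 1).foldl pvStepB (#[0, 0], #[0, 0])
  let seq := pvBacktrack st.2 n.toNat n [] ++ [1]
  (pvIdx st.1 n 0, seq.reverse)

-- ===== PRECONDITION & SPEC =====
-- Pre_: exactly the inputs on which A returns (for n ≤ 0 A raises KeyError/IndexError)
def Pre_optimal_sequence3 (n : Int) : Prop := 1 ≤ n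
instance (n : Int) : Decidable (Pre_optimal_sequence3 n) := by
  unfold Pre_optimal_sequence3; infer_instance
def pvWitness_optimal_sequence3 : Int := (10)

def Spec_optimal_sequence3 (n : Int) (out : Int × List Int) : Prop := out = optimal_sequence3_alt n
instance (n : Int) (out : Int × List Int) : Decidable (Spec_optimal_sequence3 n out) := by
  unfold Spec_optimal_sequence3; infer_instance

-- ===== CLAIM (what is proved, stated in full; the proofs are below) =====
def Claim_equal_optimal_sequence3 : Prop := ∀ (n : Int), Dom_optimal_sequence3 n → Pre_optimal_sequence3 n → Spec_optimal_sequence3 n (optimal_sequence3 n)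

-- ===== LEMMAS AND PROOFS =====

-- minimal number of operations to build j from 1 (A's n_operations[j] / B's cost[j]),
-- with A's exact tie-breaking baked into the branch order
def pvCost (j : Nat) : Int :=
  if j < 2 then 0 else
    if j % 2 = 0 ∧ pvCost (j / 2) + 1 <
        (if j % 3 = 0 ∧ pvCost (j / 3) + 1 < pvCost (j - 1) + 1
         then pvCost (j / 3) + 1 else pvCost (j - 1) + 1)
    then pvCost (j / 2) + 1
    else if j % 3 = 0 ∧ pvCost (j / 3) + 1 < pvCost (j - 1) + 1
         then pvCost (j / 3) + 1 else pvCost (j - 1) + 1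
termination_by j
decreasing_by all_goals omega

-- the predecessor both programs choose for j (B's pred[j])
def pvPred (j : Nat) : Nat :=
  if j < 2 then 0 else
    if j % 2 = 0 ∧ pvCost (j / 2) + 1 <
        (if j % 3 = 0 ∧ pvCost (j / 3) + 1 < pvCost (j - 1) + 1
         then pvCost (j / 3) + 1 else pvCost (j - 1) + 1)
    then j / 2
    else if j % 3 = 0 ∧ pvCost (j / 3) + 1 < pvCost (j - 1) + 1
         then j / 3 else j - 1

theorem pvPred_lt {j : Nat} (h : 2 ≤ j) : pvPred j < j := by
  unfold pvPred
  rw [if_neg (by omega)]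
  split_ifs <;> omega

theorem pvPred_pos {j : Nat} (h : 2 ≤ j) : 1 ≤ pvPred j := by
  unfold pvPred
  rw [if_neg (by omega)]
  split_ifs with h1 h2 <;> omega

-- A's sequences[j]
def pvSeq (j : Nat) : List Int :=
  if j < 2 then [1] else pvSeq (pvPred j) ++ [(j : Int)]
termination_by j
decreasing_by exact pvPred_lt (by omega)

-- loop-state shapes (as lists; the ports' arrays are their .toArray)
def pvOpsA (k : Nat) : List (Option Int) :=
  (List.range (k + 1)).map (fun i => if i = 0 then none else some (pvCost i))
def pvSeqsL (k : Nat) : List (List Int) :=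
  (List.range (k + 1)).map (fun i => if i = 0 then [] else pvSeq i)
def pvCostL (k : Nat) : List Int := (List.range (k + 1)).map (fun i => pvCost i)
def pvPredL (k : Nat) : List Int := (List.range (k + 1)).map (fun i => ((pvPred i : Nat) : Int))

theorem pvIdx_toArray {α : Type} (l : List α) (m : Nat) (d : α) :
    pvIdx l.toArray ((m : Nat) : Int) d = l.getD m d := by
  by_cases h : m < l.length
  · rw [pvIdx, dif_pos (by simp [h])]
    simp [h]
  · rw [pvIdx, dif_neg (by simp; omega)]
    rw [List.getD_eq_getElem?_getD, List.getElem?_eq_none (by omega)]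
    rfl

theorem pvDSet_push (l : List (List Int)) (v : List Int) :
    pvDSet l.toArray ((l.length : Nat) : Int) v = (l ++ [v]).toArray := by
  rw [pvDSet, if_neg (by simp)]
  simp

theorem pvDSet_set (l : List (List Int)) (v w : List Int) :
    pvDSet ((l ++ [v]).toArray) ((l.length : Nat) : Int) w = (l ++ [w]).toArray := by
  rw [pvDSet, if_pos (by simp)]
  apply Array.toList_inj.mp
  simp

theorem pvOpsA_get {k m : Nat} (h1 : 1 ≤ m) (h2 : m ≤ k) :
    pvIdx (pvOpsA k).toArray ((m : Nat) : Int) none = some (pvCost m) := by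
  rw [pvIdx_toArray]
  simp [pvOpsA, List.getD, show m < k + 1 by omega, show ¬ m = 0 by omega]

theorem pvCostL_get {k m : Nat} (h2 : m ≤ k) :
    pvIdx (pvCostL k).toArray ((m : Nat) : Int) 0 = pvCost m := by
  rw [pvIdx_toArray]
  simp [pvCostL, List.getD, show m < k + 1 by omega]

theorem pvPredL_get {k m : Nat} (h2 : m ≤ k) :
    pvIdx (pvPredL k).toArray ((m : Nat) : Int) 0 = ((pvPred m : Nat) : Int) := by
  rw [pvIdx_toArray]
  simp [pvPredL, List.getD, show m < k + 1 by omega]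

theorem pvSeqsL_get {k m : Nat} (h1 : 1 ≤ m) (h2 : m ≤ k) :
    pvIdx (pvSeqsL k).toArray ((m : Nat) : Int) [] = pvSeq m := by
  rw [pvIdx_toArray]
  simp [pvSeqsL, List.getD, show m < k + 1 by omega, show ¬ m = 0 by omega]

theorem pvSeqsL_get' {k m : Nat} (h1 : 1 ≤ m) (h2 : m ≤ k) (v : List Int) :
    pvIdx (pvSeqsL k ++ [v]).toArray ((m : Nat) : Int) [] = pvSeq m := by
  rw [pvIdx_toArray]
  rw [List.getD_eq_getElem?_getD, List.getElem?_append_left (by simp [pvSeqsL]; omega)]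
  simp [pvSeqsL, show m < k + 1 by omega, show ¬ m = 0 by omega]

theorem pvMod3 (m : Nat) : (PySem.Int.mod ((m : Nat) : Int) 3 == 0) = decide (m % 3 = 0) := by
  rw [show (3 : Int) = ((3 : Nat) : Int) by norm_num, PySem.Int.mod_natCast]
  rw [show ∀ a b : Int, (a == b) = decide (a = b) from fun a b => rfl, decide_eq_decide]
  omega

theorem pvMod2 (m : Nat) : (PySem.Int.mod ((m : Nat) : Int) 2 == 0) = decide (m % 2 = 0) := by
  rw [show (2 : Int) = ((2 : Nat) : Int) by norm_num, PySem.Int.mod_natCast]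
  rw [show ∀ a b : Int, (a == b) = decide (a = b) from fun a b => rfl, decide_eq_decide]
  omega

theorem pvDiv3 (m : Nat) : PySem.Int.floordiv ((m : Nat) : Int) 3 = ((m / 3 : Nat) : Int) := by
  rw [show (3 : Int) = ((3 : Nat) : Int) by norm_num, PySem.Int.floordiv_natCast]

theorem pvDiv2 (m : Nat) : PySem.Int.floordiv ((m : Nat) : Int) 2 = ((m / 2 : Nat) : Int) := by
  rw [show (2 : Int) = ((2 : Nat) : Int) by norm_num, PySem.Int.floordiv_natCast]

theorem pvSeqsL_succ (k : Nat) :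
    pvSeqsL (k + 1) = pvSeqsL k ++ [pvSeq (k + 1)] := by
  simp [pvSeqsL, List.range_succ]

theorem pvSeqsL_len (k : Nat) : (pvSeqsL k).length = k + 1 := by
  simp [pvSeqsL]

theorem pvOpsA_succ (k : Nat) :
    pvOpsA (k + 1) = pvOpsA k ++ [some (pvCost (k + 1))] := by
  simp [pvOpsA, List.range_succ]

theorem pvCostL_succ (k : Nat) :
    pvCostL (k + 1) = pvCostL k ++ [pvCost (k + 1)] := by
  simp [pvCostL, List.range_succ]

theorem pvPredL_succ (k : Nat) :
    pvPredL (k + 1) = pvPredL k ++ [((pvPred (k + 1) : Nat) : Int)] := by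
  simp [pvPredL, List.range_succ]

theorem pvCost_lt2 {m : Nat} (h : m < 2) : pvCost m = 0 := by
  rw [pvCost, if_pos h]

theorem pvOpsA_getD0 {k m : Nat} (h2 : m ≤ k) :
    (pvIdx (pvOpsA k).toArray ((m : Nat) : Int) none).getD 0 = pvCost m := by
  by_cases h : m = 0
  · subst h
    rw [pvIdx_toArray]
    simp [pvOpsA, List.getD, pvCost_lt2 (by omega : (0 : Nat) < 2),
      show 0 < k + 1 by omega]
  · rw [pvOpsA_get (by omega) h2]
    rfl

theorem pvCost_succ (k : Nat) (hk : 1 ≤ k) :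
    pvCost (k + 1) =
      if (k + 1) % 2 = 0 ∧ pvCost ((k + 1) / 2) + 1 <
          (if (k + 1) % 3 = 0 ∧ pvCost ((k + 1) / 3) + 1 < pvCost k + 1
           then pvCost ((k + 1) / 3) + 1 else pvCost k + 1)
      then pvCost ((k + 1) / 2) + 1
      else if (k + 1) % 3 = 0 ∧ pvCost ((k + 1) / 3) + 1 < pvCost k + 1
           then pvCost ((k + 1) / 3) + 1 else pvCost k + 1 := by
  rw [pvCost, if_neg (by omega)]
  norm_num

theorem pvPred_succ (k : Nat) (hk : 1 ≤ k) :
    pvPred (k + 1) =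
      if (k + 1) % 2 = 0 ∧ pvCost ((k + 1) / 2) + 1 <
          (if (k + 1) % 3 = 0 ∧ pvCost ((k + 1) / 3) + 1 < pvCost k + 1
           then pvCost ((k + 1) / 3) + 1 else pvCost k + 1)
      then (k + 1) / 2
      else if (k + 1) % 3 = 0 ∧ pvCost ((k + 1) / 3) + 1 < pvCost k + 1
           then (k + 1) / 3 else k := by
  rw [pvPred, if_neg (by omega)]
  norm_num

theorem pvSeq_succ (k : Nat) (hk : 1 ≤ k) :
    pvSeq (k + 1) = pvSeq (pvPred (k + 1)) ++ [((k + 1 : Nat) : Int)] := by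
  rw [pvSeq, if_neg (by omega)]

theorem pvStepA_eq (k : Nat) (hk : 1 ≤ k) :
    pvStepA ((pvOpsA k).toArray, (pvSeqsL k).toArray) (((k + 1 : Nat) : Int))
    = ((pvOpsA (k + 1)).toArray, (pvSeqsL (k + 1)).toArray) := by
  have e1 : ((k + 1 : Nat) : Int) - 1 = ((k : Nat) : Int) := by push_cast; ring
  have elen : ((k + 1 : Nat) : Int) = (((pvSeqsL k).length : Nat) : Int) := by
    rw [pvSeqsL_len]
  simp only [pvStepA, e1, pvMod3, pvDiv3, pvMod2, pvDiv2, Bool.and_eq_true,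
    decide_eq_true_eq]
  rw [pvOpsA_getD0 (le_refl k), pvOpsA_getD0 (show (k + 1) / 3 ≤ k by omega),
    pvOpsA_getD0 (show (k + 1) / 2 ≤ k by omega),
    pvSeqsL_get hk (le_refl k),
    pvOpsA_succ, pvSeqsL_succ, pvCost_succ k hk, pvSeq_succ k hk, pvPred_succ k hk,
    elen, pvDSet_push]
  simp only [apply_ite (Prod.fst (α := Int) (β := Array (List Int))),
    apply_ite (Prod.snd (α := Int) (β := Array (List Int))),
    apply_ite (fun a : Array (List Int) =>
      pvIdx a (((k + 1) / 2 : Nat) : Int) [])]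
  split_ifs with h3 h2 h2
  · obtain ⟨h31, -⟩ := h3
    rw [pvSeqsL_get' (show 1 ≤ (k + 1) / 3 by omega) (show (k + 1) / 3 ≤ k by omega), pvDSet_set,
      pvSeqsL_get' (show 1 ≤ (k + 1) / 2 by omega) (show (k + 1) / 2 ≤ k by omega), pvDSet_set]
    simp [List.push_toArray]
  · obtain ⟨h31, -⟩ := h3
    rw [pvSeqsL_get' (show 1 ≤ (k + 1) / 3 by omega) (show (k + 1) / 3 ≤ k by omega), pvDSet_set]
    simp [List.push_toArray]
  · rw [pvSeqsL_get' (show 1 ≤ (k + 1) / 2 by omega) (show (k + 1) / 2 ≤ k by omega), pvDSet_set]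
    simp [List.push_toArray]
  · simp [List.push_toArray]

theorem pvStepB_eq (k : Nat) (hk : 1 ≤ k) :
    pvStepB ((pvCostL k).toArray, (pvPredL k).toArray) (((k + 1 : Nat) : Int))
    = ((pvCostL (k + 1)).toArray, (pvPredL (k + 1)).toArray) := by
  have e1 : ((k + 1 : Nat) : Int) - 1 = ((k : Nat) : Int) := by push_cast; ring
  simp only [pvStepB, e1, pvMod3, pvDiv3, pvMod2, pvDiv2, Bool.and_eq_true,
    decide_eq_true_eq]
  rw [pvCostL_get (le_refl k), pvCostL_get (show (k + 1) / 3 ≤ k by omega),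
    pvCostL_get (show (k + 1) / 2 ≤ k by omega),
    pvCostL_succ, pvPredL_succ, pvCost_succ k hk, pvPred_succ k hk]
  simp only [apply_ite (Prod.fst (α := Int) (β := Int)),
    apply_ite (Prod.snd (α := Int) (β := Int))]
  split_ifs <;> simp

theorem pvLoopA (k : Nat) (hk : 1 ≤ k) :
    (PySem.List.pyRange 2 ((k : Int) + 1) 1).foldl pvStepA (#[none, some 0], #[[], [1]])
    = ((pvOpsA k).toArray, (pvSeqsL k).toArray) := by
  induction k, hk using Nat.le_induction with
  | base =>
    rw [PySem.List.pyRange_one_eq_nil (by norm_num)]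
    have h1 : pvSeq 1 = [1] := by rw [pvSeq, if_pos (by omega)]
    refine Prod.ext ?_ ?_
    · show (([none, some 0] : List (Option Int))).toArray = (pvOpsA 1).toArray
      simp [pvOpsA, List.range_succ, pvCost_lt2 (by omega : (1 : Nat) < 2)]
    · show (([[], [1]] : List (List Int))).toArray = (pvSeqsL 1).toArray
      simp [pvSeqsL, List.range_succ, h1]
  | succ k hk ih =>
    rw [show (((k + 1 : Nat) : Int)) + 1 = (((k : Nat) : Int) + 1) + 1 by push_cast; ring,
      PySem.List.pyRange_one_succ_right (by exact_mod_cast by omega),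
      List.foldl_append, ih]
    simp only [List.foldl_cons, List.foldl_nil]
    rw [show ((k : Int) + 1) = ((k + 1 : Nat) : Int) by push_cast; ring]
    exact pvStepA_eq k hk

theorem pvLoopB (k : Nat) (hk : 1 ≤ k) :
    (PySem.List.pyRange 2 ((k : Int) + 1) 1).foldl pvStepB (#[0, 0], #[0, 0])
    = ((pvCostL k).toArray, (pvPredL k).toArray) := by
  induction k, hk using Nat.le_induction with
  | base =>
    rw [PySem.List.pyRange_one_eq_nil (by norm_num)]
    have hp : pvPred 1 = 0 := by rw [pvPred, if_pos (by omega)]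
    refine Prod.ext ?_ ?_
    · show (([0, 0] : List Int)).toArray = (pvCostL 1).toArray
      simp [pvCostL, List.range_succ, pvCost_lt2]
    · show (([0, 0] : List Int)).toArray = (pvPredL 1).toArray
      have hp0 : pvPred 0 = 0 := by rw [pvPred, if_pos (by omega)]
      simp [pvPredL, List.range_succ, hp, hp0]
  | succ k hk ih =>
    rw [show (((k + 1 : Nat) : Int)) + 1 = (((k : Nat) : Int) + 1) + 1 by push_cast; ring,
      PySem.List.pyRange_one_succ_right (by exact_mod_cast by omega),
      List.foldl_append, ih]
    simp only [List.foldl_cons, List.foldl_nil]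
    rw [show ((k : Int) + 1) = ((k + 1 : Nat) : Int) by push_cast; ring]
    exact pvStepB_eq k hk

theorem pvBacktrack_eq (k : Nat) (m : Nat) (fuel : Nat) (acc : List Int)
    (h1 : 1 ≤ m) (h2 : m ≤ k) (hf : m ≤ fuel) :
    pvBacktrack (pvPredL k).toArray fuel ((m : Nat) : Int) acc ++ [1]
    = acc ++ (pvSeq m).reverse := by
  induction fuel using Nat.strong_induction_on generalizing m acc with
  | _ fuel ih =>
    match fuel with
    | 0 => omega
    | f + 1 =>
      rw [pvBacktrack]
      by_cases hm : 2 ≤ m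
      · have hplt := pvPred_lt hm
        have hppos := pvPred_pos hm
        rw [if_pos (by exact_mod_cast by omega : (1 : Int) < ((m : Nat) : Int))]
        rw [pvPredL_get (show m ≤ k by omega)]
        rw [ih f (by omega) (pvPred m) (acc ++ [((m : Nat) : Int)]) hppos
          (by omega) (by omega)]
        conv_rhs => rw [pvSeq]
        rw [if_neg (show ¬ m < 2 by omega)]
        simp
      · have hm1 : m = 1 := by omega
        subst hm1
        rw [if_neg (by exact_mod_cast by omega : ¬ (1 : Int) < ((1 : Nat) : Int))]
        rw [pvSeq, if_pos (by omega)]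
        simp

-- ===== VERDICT (by name: the statement is the Claim_ definition above) =====
theorem optimal_sequence3_spec : Claim_equal_optimal_sequence3 := by
  intro n _ hpre
  have h1n : (1 : Int) ≤ n := hpre
  unfold Spec_optimal_sequence3 optimal_sequence3 optimal_sequence3_alt
  have hm : n = ((n.toNat : Nat) : Int) := by omega
  have h1 : 1 ≤ n.toNat := by omega
  rw [hm, pvLoopA _ h1, pvLoopB _ h1]
  simp only
  rw [pvOpsA_getD0 le_rfl, pvCostL_get le_rfl, pvSeqsL_get h1 le_rfl,
      Int.toNat_natCast, pvBacktrack_eq n.toNat n.toNat n.toNat [] h1 le_rfl le_rfl]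
  simp
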